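-- pv_equiv track=rewrite | github.com/sablet/spec2code | spectool/spectool/core/engine/config_validator_impl.py | _filter_docstrings
-- ===== SOURCE A (Python) =====
-- def _filter_docstrings(code_lines: list[str]) -> list[str]:
--     """コード行からdocstringを除外
--
--     Args:
--         code_lines: コード行のリスト
--
--     Returns:
--         docstringを除外したコード行のリスト
--     """
--     filtered_lines = []
--     in_docstring = False
--     for line in code_lines:
--         if '"""' in line or "'''" in line:
--             if in_docstring:
--                 in_docstring = False
--                 continue
--             in_docstring = True
--             continue
--         if not in_docstring:
--             filtered_lines.append(line)
--     return filtered_lines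
-- ===== SOURCE B (Python) =====
-- def _filter_docstrings(code_lines: list[str]) -> list[str]:
--     """Split the lines into groups separated by triple-quote marker lines
--     (the markers themselves are discarded), then keep the groups at even
--     indices: those are the regions outside any docstring."""
--     groups = []
--     current = []
--     for line in code_lines:
--         if '"""' in line or "'''" in line:
--             groups.append(current)
--             current = []
--         else:
--             current.append(line)
--     groups.append(current)
--     result = []
--     while groups:
--         result += groups[0]
--         groups = groups[2:]
--     return result
-- ===== Notes on version B (the rewrite author's own statement) =====
-- stated objective: alternative
-- what changed: Replaced the in_docstring boolean toggle with a segmentation pass: lines are grouped between marker lines, and the result is the concatenation of the even-indexed groups (regions outside docstrings).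
import Mathlib
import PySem

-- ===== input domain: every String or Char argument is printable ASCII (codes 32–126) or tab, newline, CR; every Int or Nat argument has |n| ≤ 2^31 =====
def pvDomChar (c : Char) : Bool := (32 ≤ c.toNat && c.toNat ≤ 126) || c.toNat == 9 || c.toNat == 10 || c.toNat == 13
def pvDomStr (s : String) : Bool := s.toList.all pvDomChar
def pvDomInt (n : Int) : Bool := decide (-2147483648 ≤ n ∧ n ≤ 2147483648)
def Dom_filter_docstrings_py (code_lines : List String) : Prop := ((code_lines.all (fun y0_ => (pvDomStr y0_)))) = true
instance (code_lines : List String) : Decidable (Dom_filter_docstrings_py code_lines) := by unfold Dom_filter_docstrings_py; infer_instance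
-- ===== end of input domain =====

-- B replaces A's in_docstring toggle by a segmentation pass (groups between marker
-- lines, concatenating the even-indexed groups); alternative decomposition, same cost.

-- ===== PORT A =====
-- line contains '"""' or "'''"
def pvIsMarker (line : String) : Bool :=
  PySem.Str.isIn "\"\"\"" line || PySem.Str.isIn "'''" line

-- A: one pass with (filtered_lines, in_docstring) state
def filter_docstrings_py (code_lines : List String) : List String :=
  (code_lines.foldl
    (fun (st : List String × Bool) line =>
      if pvIsMarker line then
        (if st.2 then (st.1, false) else (st.1, true))
      else if st.2 = false then (st.1 ++ [line], st.2) else st)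
    ([], false)).1

-- ===== PORT B =====
-- the loop building (groups, current)
def pvGroupStep (st : List (List String) × List String) (line : String) :
    List (List String) × List String :=
  if pvIsMarker line then (st.1 ++ [st.2], []) else (st.1, st.2 ++ [line])

-- the 'while groups: result += groups[0]; groups = groups[2:]' loop
def pvEvens : List (List String) → List String
  | [] => []
  | [g] => g
  | g :: _ :: rest => g ++ pvEvens rest

def filter_docstrings_py_alt (code_lines : List String) : List String :=
  let st := code_lines.foldl pvGroupStep ([], [])
  pvEvens (st.1 ++ [st.2])

-- ===== PRECONDITION & SPEC =====
def Spec_filter_docstrings_py (code_lines : List String) (out : List String) : Prop := out = filter_docstrings_py_alt code_lines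
instance (code_lines : List String) (out : List String) : Decidable (Spec_filter_docstrings_py code_lines out) := by unfold Spec_filter_docstrings_py; infer_instance

-- ===== CLAIM (what is proved, stated in full; the proofs are below) =====
def Claim_equal_filter_docstrings_py : Prop := ∀ (code_lines : List String), Dom_filter_docstrings_py code_lines → Spec_filter_docstrings_py code_lines (filter_docstrings_py code_lines)

-- ===== LEMMAS AND PROOFS =====

theorem pvEvens_cons (g : List String) (rest : List (List String)) :
    pvEvens (g :: rest) = g ++ pvEvens (rest.drop 1) := by
  cases rest <;> simp [pvEvens]

-- B's full group list for a run starting with current = cur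
def pvGroups (xs : List String) (cur : List String) : List (List String) :=
  let st := xs.foldl pvGroupStep ([], cur)
  st.1 ++ [st.2]

-- the group-prefix gs only gets appended to
theorem pvGroupStep_prefix (xs : List String) (gs : List (List String)) (cur : List String) :
    xs.foldl pvGroupStep (gs, cur)
      = (gs ++ (xs.foldl pvGroupStep ([], cur)).1, (xs.foldl pvGroupStep ([], cur)).2) := by
  induction xs generalizing gs cur with
  | nil => simp [List.foldl]
  | cons x xs ih =>
    simp only [List.foldl, pvGroupStep]
    by_cases h : pvIsMarker x = true
    · simp only [h, if_pos]
      rw [ih (gs ++ [cur]) [], ih ([] ++ [cur]) []]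
      simp
    · simp only [h, if_false, Bool.false_eq_true]
      exact ih gs (cur ++ [x])

theorem pvGroups_ne_nil (xs cur : List String) : pvGroups xs cur ≠ [] := by
  simp [pvGroups]

-- an initial 'current' is just prepended into the first group
theorem pvGroups_cur (xs : List String) (cur : List String) :
    pvGroups xs cur
      = (cur ++ (pvGroups xs []).headI) :: (pvGroups xs []).tail := by
  induction xs generalizing cur with
  | nil => simp [pvGroups, List.foldl]
  | cons x xs ih =>
    simp only [pvGroups, List.foldl, pvGroupStep]
    by_cases h : pvIsMarker x = true
    · simp only [h, if_pos, List.nil_append]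
      rw [pvGroupStep_prefix xs [cur] [], pvGroupStep_prefix xs [[]] []]
      simp
    · simp only [h, if_false, Bool.false_eq_true, List.nil_append]
      have h1 := ih (cur ++ [x])
      have h2 := ih [x]
      simp only [pvGroups] at h1 h2
      rw [h1, h2]; simp

theorem pvGroups_cons_marker (x : String) (xs : List String) (h : pvIsMarker x = true) :
    pvGroups (x :: xs) [] = [] :: pvGroups xs [] := by
  simp only [pvGroups, List.foldl, pvGroupStep, h, if_pos, List.nil_append]
  rw [pvGroupStep_prefix xs [[]] []]
  simp

theorem pvGroups_cons_line (x : String) (xs : List String) (h : ¬ pvIsMarker x = true) :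
    pvGroups (x :: xs) [] = (x :: (pvGroups xs []).headI) :: (pvGroups xs []).tail := by
  simp only [pvGroups, List.foldl, pvGroupStep, h, List.nil_append]
  simp only [Bool.false_eq_true, if_false]
  have h1 := pvGroups_cur xs [x]
  simp only [pvGroups] at h1
  rw [h1]; simp

-- main invariant: A's fold from (acc, b) = acc ++ the even/odd groups of B's run
theorem pvMain (xs : List String) (acc : List String) (b : Bool) :
    (xs.foldl
      (fun (st : List String × Bool) line =>
        if pvIsMarker line then
          (if st.2 then (st.1, false) else (st.1, true))
        else if st.2 = false then (st.1 ++ [line], st.2) else st)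
      (acc, b)).1
    = acc ++ (if b then pvEvens ((pvGroups xs []).drop 1) else pvEvens (pvGroups xs [])) := by
  induction xs generalizing acc b with
  | nil => cases b <;> simp [pvGroups, List.foldl, pvEvens]
  | cons x xs ih =>
    simp only [List.foldl]
    by_cases h : pvIsMarker x = true
    · cases b with
      | false =>
        simp only [h, if_pos, Bool.false_eq_true, if_false]
        rw [ih acc true, pvGroups_cons_marker x xs h]
        rw [pvEvens_cons]
        simp [List.drop_one]
      | true =>
        simp only [h, if_pos]
        rw [ih acc false, pvGroups_cons_marker x xs h]
        simp
    · obtain ⟨g, t, hgt⟩ : ∃ g t, pvGroups xs [] = g :: t := by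
        cases hx : pvGroups xs [] with
        | nil => exact absurd hx (pvGroups_ne_nil xs [])
        | cons g t => exact ⟨g, t, rfl⟩
      cases b with
      | false =>
        simp only [h, if_false, Bool.false_eq_true, if_pos]
        rw [ih (acc ++ [x]) false, pvGroups_cons_line x xs h, hgt]
        simp only [List.headI, List.tail_cons]
        rw [pvEvens_cons, pvEvens_cons]
        simp
      | true =>
        simp only [h, if_false, Bool.false_eq_true,
          show ((true : Bool) = false) = False by simp, if_pos]
        rw [ih acc true, pvGroups_cons_line x xs h, hgt]
        simp

-- ===== VERDICT (by name: the statement is the Claim_ definition above) =====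
theorem filter_docstrings_py_spec : Claim_equal_filter_docstrings_py := by
  intro code_lines _
  unfold Spec_filter_docstrings_py filter_docstrings_py filter_docstrings_py_alt
  rw [pvMain code_lines [] false]
  simp [pvGroups]
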